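-- pv_equiv track=rewrite | github.com/neizod/problems | acm/uva/10101-bangla-numbers.py | bangla
-- ===== SOURCE A (Python) =====
-- def iter_divisor():
--     while True:
--         yield from iter([100, 10, 100, 100])
--
-- def iter_expander():
--     while True:
--         yield from iter(['shata', 'hajar', 'lakh', 'kuti'])
--
-- def split(number):
--     parts = []
--     for divisor in iter_divisor():
--         number, remainder = divmod(number, divisor)
--         parts += [remainder]
--         if not number:
--             break
--     return list(reversed(parts))
--
-- def bangla(number):
--     words = []
--     parts = split(number)
--     for expander in iter_expander():
--         part = parts.pop()
--         if part or not parts: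
--             words += [str(part)]
--         if parts and (parts[-1] or expander == 'kuti'):
--             words += [expander]
--         if not parts:
--             break
--     return ' '.join(reversed(words))
-- ===== SOURCE B (Python) =====
-- def bangla(number):
--     table = [(100, 'shata'), (10, 'hajar'), (100, 'lakh'), (100, 'kuti')]
--
--     def words(n, k):
--         div, name = table[k % 4]
--         q, r = divmod(n, div)
--         if not q:
--             return [str(r)]
--         toks = words(q, k + 1)
--         if q % table[(k + 1) % 4][0] or k % 4 == 3:
--             toks.append(name)
--         if r:
--             toks.append(str(r))
--         return toks
--
--     return ' '.join(words(number, 0))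
-- ===== Notes on version B (the rewrite author's own statement) =====
-- stated objective: simpler
-- what changed: B drops A's generators, split/reverse list and destructive pop loop entirely: one small recursive helper over a (divisor, place-name) pair table divmods the number and builds the word list most-significant-first directly.
import Mathlib
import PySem

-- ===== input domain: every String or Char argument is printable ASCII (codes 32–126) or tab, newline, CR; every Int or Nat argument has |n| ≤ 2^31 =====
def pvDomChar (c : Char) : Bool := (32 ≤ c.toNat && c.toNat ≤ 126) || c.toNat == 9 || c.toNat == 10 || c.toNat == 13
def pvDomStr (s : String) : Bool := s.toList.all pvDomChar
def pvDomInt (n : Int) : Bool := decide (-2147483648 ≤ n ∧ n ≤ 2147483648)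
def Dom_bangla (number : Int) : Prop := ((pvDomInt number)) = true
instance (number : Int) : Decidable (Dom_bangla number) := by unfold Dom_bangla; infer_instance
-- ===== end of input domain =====

-- B replaces A's generator/split/reverse/pop pipeline with one recursive helper over a
-- (divisor, name) pair table that builds the word list most-significant-first directly:
-- objective 'simpler'.


-- ===== PORT A =====
-- iter_divisor / iter_expander: the cycling sequences, indexed by iteration count mod 4
def pvDivisors : Nat → Int
  | 0 => 100
  | 1 => 10
  | _ => 100

def pvExpanders : Nat → String
  | 0 => "shata"
  | 1 => "hajar"
  | 2 => "lakh"
  | _ => "kuti"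

-- split's while-True loop; fuel (number.toNat+1) is enough on Pre_ since the quotient shrinks
def splitGo : Nat → Int → Nat → List Int
  | 0, _, _ => []
  | fuel+1, n, i =>
    let r := PySem.Int.mod n (pvDivisors (i % 4))
    let q := PySem.Int.floordiv n (pvDivisors (i % 4))
    if q = 0 then [r] else r :: splitGo fuel q (i+1)

def pvSplit (number : Int) : List Int := (splitGo (number.toNat + 1) number 0).reverse

-- bangla's for-loop: parts.pop() = getLast?/dropLast; it runs at most parts.length times
def banglaLoop : Nat → List Int → Nat → List String → List String
  | 0, _, _, words => words
  | fuel+1, parts, i, words =>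
    match parts.getLast? with
    | none => words
    | some part =>
      let rest := parts.dropLast
      let words1 := if part ≠ 0 ∨ rest = [] then words ++ [PySem.Int.toStr part] else words
      let words2 := if rest ≠ [] ∧ (rest.getLast?.getD 0 ≠ 0 ∨ pvExpanders (i % 4) = "kuti")
        then words1 ++ [pvExpanders (i % 4)] else words1
      if rest = [] then words2 else banglaLoop fuel rest (i+1) words2

def bangla (number : Int) : String :=
  let parts := pvSplit number
  PySem.Str.join " " (banglaLoop parts.length parts 0 []).reverse

-- ===== PORT B =====
-- B's table of (divisor, place-name) pairs, indexed by level mod 4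
def pvTableB : List (Int × String) := [(100, "shata"), (10, "hajar"), (100, "lakh"), (100, "kuti")]

-- B's recursive words(n, k): tokens for n's groups from level k up, most-significant-first;
-- fuel (n.toNat+1) suffices on Pre_ because the quotient strictly decreases
def wordsGo : Nat → Int → Nat → List String
  | 0, _, _ => []
  | fuel+1, n, k =>
    let dv := (pvTableB.getD (k % 4) (0, "")).1
    let q := PySem.Int.floordiv n dv
    let r := PySem.Int.mod n dv
    if q = 0 then [PySem.Int.toStr r]
    else
      let toks := wordsGo fuel q (k + 1)
      let toks2 :=
        if PySem.Int.mod q (pvTableB.getD ((k + 1) % 4) (0, "")).1 ≠ 0 ∨ k % 4 = 3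
        then toks ++ [(pvTableB.getD (k % 4) (0, "")).2] else toks
      if r ≠ 0 then toks2 ++ [PySem.Int.toStr r] else toks2

def bangla_alt (number : Int) : String :=
  PySem.Str.join " " (wordsGo (number.toNat + 1) number 0)

-- ===== PRECONDITION & SPEC =====
-- On negative input A's split loop never terminates (the floor quotient stays negative),
-- so A never returns there; Pre_ admits exactly the inputs on which A returns.
def Pre_bangla (number : Int) : Prop := 0 ≤ number
instance (number : Int) : Decidable (Pre_bangla number) := by unfold Pre_bangla; infer_instance

def pvWitness_bangla : Int := 1234567

def Spec_bangla (number : Int) (out : String) : Prop := out = bangla_alt number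
instance (number : Int) (out : String) : Decidable (Spec_bangla number out) := by unfold Spec_bangla; infer_instance

-- ===== CLAIM (what is proved, stated in full; the proofs are below) =====
def Claim_equal_bangla : Prop := ∀ (number : Int), Dom_bangla number → Pre_bangla number → Spec_bangla number (bangla number)

-- ===== LEMMAS AND PROOFS =====

theorem tabDiv (k : Nat) : (pvTableB.getD (k % 4) (0, "")).1 = pvDivisors (k % 4) := by
  have h : k % 4 < 4 := Nat.mod_lt k (by norm_num)
  set m := k % 4 with hm
  interval_cases m <;> rfl

theorem tabName (k : Nat) : (pvTableB.getD (k % 4) (0, "")).2 = pvExpanders (k % 4) := by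
  have h : k % 4 < 4 := Nat.mod_lt k (by norm_num)
  set m := k % 4 with hm
  interval_cases m <;> rfl

theorem pvDivisors_ge (m : Nat) : 10 ≤ pvDivisors m := by
  cases m with
  | zero => norm_num [pvDivisors]
  | succ m => cases m with
    | zero => norm_num [pvDivisors]
    | succ m => norm_num [pvDivisors]

theorem quot_bounds (n : Int) (m : Nat) (hn : 0 ≤ n)
    (hq : PySem.Int.floordiv n (pvDivisors m) ≠ 0) :
    0 ≤ PySem.Int.floordiv n (pvDivisors m) ∧ PySem.Int.floordiv n (pvDivisors m) < n := by
  have hd := pvDivisors_ge m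
  have hdpos : (0:Int) < pvDivisors m := by omega
  constructor
  · rw [PySem.Int.le_floordiv_iff_mul_le hdpos]; simpa using hn
  · rw [PySem.Int.floordiv_lt_iff_lt_mul hdpos]
    have hn1 : 1 ≤ n := by
      by_contra h
      have : n = 0 := by omega
      subst this
      apply hq
      rw [PySem.Int.floordiv_eq_iff_of_pos hdpos]; constructor <;> omega
    nlinarith

theorem splitGo_ne_nil (fuel : Nat) (n : Int) (i : Nat) : splitGo (fuel+1) n i ≠ [] := by
  simp only [splitGo]
  split_ifs <;> simp

theorem splitGo_head (fuel : Nat) (n : Int) (i : Nat) :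
    (splitGo (fuel+1) n i).head? = some (PySem.Int.mod n (pvDivisors (i % 4))) := by
  simp only [splitGo]
  split_ifs <;> rfl

theorem kuti_iff (i : Nat) : pvExpanders (i % 4) = "kuti" ↔ i % 4 = 3 := by
  have h : i % 4 < 4 := Nat.mod_lt i (by norm_num)
  set m := i % 4 with hm
  interval_cases m <;> simp [pvExpanders]

-- canonical token lists (indices into the LSB-first group list gs)
def stepP (gs : List Int) (j : Nat) : List String :=
  if gs.getD j 0 ≠ 0 ∨ j = gs.length - 1 then [PySem.Int.toStr (gs.getD j 0)] else []

def stepE (gs : List Int) (j : Nat) : List String :=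
  if j + 1 < gs.length ∧ (gs.getD (j+1) 0 ≠ 0 ∨ j % 4 = 3) then [pvExpanders (j % 4)] else []

-- tokens for positions gs.length-1 down to gs.length-t
def Etok (gs : List Int) : Nat → List String
  | 0 => []
  | t+1 => Etok gs t ++ stepE gs (gs.length - (t+1)) ++ stepP gs (gs.length - (t+1))

-- B's token list over an explicit group list (proof-side mirror of wordsGo)
def emitT : List Int → Nat → List String
  | [], _ => []
  | [g], _ => [PySem.Int.toStr g]
  | g :: h :: rest, k =>
    emitT (h :: rest) (k+1)
      ++ (if h ≠ 0 ∨ k % 4 = 3 then [pvExpanders (k % 4)] else [])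
      ++ (if g ≠ 0 then [PySem.Int.toStr g] else [])

theorem stepE_last (gs : List Int) : stepE gs (gs.length - 1) = [] := by
  by_cases h : gs = []
  · simp [stepE, h]
  · have : gs.length - 1 + 1 = gs.length := by
      have := List.length_pos_iff.mpr h; omega
    simp [stepE, this]

theorem banglaLoop_eq_Etok (gs : List Int) :
    ∀ fuel k words, k < gs.length → gs.length - k ≤ fuel →
      (banglaLoop fuel ((gs.drop k).reverse) k words).reverse
        = Etok gs (gs.length - k) ++ words.reverse := by
  intro fuel
  induction fuel with
  | zero => intro k words hk hf; omega
  | succ fuel ih =>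
    intro k words hk hf
    have hdk : gs.drop k = gs[k] :: gs.drop (k+1) := List.drop_eq_getElem_cons hk
    have hgetD : gs.getD k 0 = gs[k] := by
      simp [List.getD_eq_getElem?_getD, List.getElem?_eq_getElem hk]
    by_cases hend : k + 1 < gs.length
    · have hdk1 : gs.drop (k+1) ≠ [] := by
        simp only [ne_eq, List.drop_eq_nil_iff]; omega
      have hrest : ((gs.drop k).reverse).dropLast = (gs.drop (k+1)).reverse := by
        rw [hdk]; simp
      have hlast : ((gs.drop k).reverse).getLast? = some gs[k] := by
        rw [hdk]; simp
      have hrestne : (gs.drop (k+1)).reverse ≠ [] := by simpa using hdk1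
      have hrlast : ((gs.drop (k+1)).reverse).getLast?.getD 0 = gs.getD (k+1) 0 := by
        simp [List.getLast?_reverse, List.head?_drop, List.getD_eq_getElem?_getD]
      have hEunf : gs.length - k = (gs.length - (k+1)) + 1 := by omega
      have hidx : gs.length - ((gs.length - (k+1)) + 1) = k := by omega
      simp only [banglaLoop, hlast]
      rw [hrest, if_neg hrestne]
      rw [ih (k+1) _ hend (by omega)]
      rw [hEunf]
      simp only [Etok, hidx]
      have hkne : ¬ (k = gs.length - 1) := by omega
      have hP : stepP gs k = if gs[k] ≠ 0 then [PySem.Int.toStr gs[k]] else [] := by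
        simp [stepP, hkne, List.getD_eq_getElem?_getD, List.getElem?_eq_getElem hk]
      have hE : stepE gs k =
          if gs.getD (k+1) 0 ≠ 0 ∨ k % 4 = 3 then [pvExpanders (k % 4)] else [] := by
        simp [stepE, hend]
      rw [hP, hE]
      rw [hrlast]
      by_cases h1 : gs[k] = (0:Int) <;> by_cases h2 : gs.getD (k+1) 0 ≠ 0 ∨ k % 4 = 3 <;>
        simp_all [kuti_iff]
    · have hk1 : k = gs.length - 1 := by omega
      have hdk1 : gs.drop (k+1) = [] := by simp [List.drop_eq_nil_iff]; omega
      have hrest : ((gs.drop k).reverse).dropLast = [] := by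
        rw [hdk, hdk1]; simp
      have hlast : ((gs.drop k).reverse).getLast? = some gs[k] := by
        rw [hdk, hdk1]; simp
      have hEunf : gs.length - k = 1 := by omega
      simp only [banglaLoop, hlast]
      rw [hrest, hEunf]
      have hPE : Etok gs 1 = stepP gs (gs.length - 1) := by simp [Etok, stepE_last]
      have hidx : gs.length - 1 = k := by omega
      have hP : stepP gs k = [PySem.Int.toStr gs[k]] := by
        simp only [stepP]
        rw [if_pos (Or.inr hk1)]
        simp [List.getD_eq_getElem?_getD, List.getElem?_eq_getElem hk]
      rw [hPE, hidx, hP]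
      simp

theorem banglaLoop_main (gs : List Int) (h : gs ≠ []) :
    (banglaLoop gs.length gs.reverse 0 []).reverse = Etok gs gs.length := by
  have hlen : 0 < gs.length := List.length_pos_iff.mpr h
  have := banglaLoop_eq_Etok gs gs.length 0 [] hlen (by omega)
  simpa using this

theorem wordsGo_eq_emitT :
    ∀ fuel (n : Int) (k : Nat), 0 ≤ n → n.toNat < fuel →
      wordsGo fuel n k = emitT (splitGo fuel n k) k := by
  intro fuel
  induction fuel with
  | zero => intro n k _ hf; omega
  | succ fuel ih =>
    intro n k hn hf
    simp only [wordsGo, splitGo, tabDiv, tabName]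
    by_cases hq : PySem.Int.floordiv n (pvDivisors (k % 4)) = 0
    · rw [if_pos hq, if_pos hq]; rfl
    · rw [if_neg hq, if_neg hq]
      obtain ⟨hq0, hqlt⟩ := quot_bounds n (k % 4) hn hq
      have hfu : (PySem.Int.floordiv n (pvDivisors (k % 4))).toNat < fuel := by omega
      obtain ⟨fuel', rfl⟩ : ∃ f', fuel = f' + 1 := ⟨fuel - 1, by omega⟩
      have hhead := splitGo_head fuel' (PySem.Int.floordiv n (pvDivisors (k % 4))) (k+1)
      obtain ⟨h, t, hht⟩ : ∃ h t, splitGo (fuel'+1) (PySem.Int.floordiv n (pvDivisors (k % 4))) (k+1) = h :: t := by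
        cases hs : splitGo (fuel'+1) (PySem.Int.floordiv n (pvDivisors (k % 4))) (k+1) with
        | nil => exact absurd hs (splitGo_ne_nil _ _ _)
        | cons h t => exact ⟨h, t, rfl⟩
      have hh : h = PySem.Int.mod (PySem.Int.floordiv n (pvDivisors (k % 4))) (pvDivisors ((k+1) % 4)) := by
        rw [hht] at hhead; simpa using hhead
      rw [ih _ (k+1) hq0 hfu, hht]
      simp only [emitT, ← hh]
      split_ifs <;> simp

theorem emitT_eq_Etok (gs : List Int) :
    ∀ d, 0 < d → d ≤ gs.length →
      emitT (gs.drop (gs.length - d)) (gs.length - d) = Etok gs d := by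
  intro d
  induction d with
  | zero => intro h _; omega
  | succ d ihd =>
    intro _ hle
    have hk : gs.length - (d+1) < gs.length := by omega
    have hdk : gs.drop (gs.length - (d+1)) = gs[gs.length - (d+1)] :: gs.drop (gs.length - (d+1) + 1) :=
      List.drop_eq_getElem_cons hk
    have hgetD : gs.getD (gs.length - (d+1)) 0 = gs[gs.length - (d+1)] := by
      simp [List.getD_eq_getElem?_getD, List.getElem?_eq_getElem hk]
    cases Nat.eq_zero_or_pos d with
    | inl hd0 =>
      subst hd0
      have hdrop1 : gs.drop (gs.length - 1 + 1) = [] := by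
        simp [List.drop_eq_nil_iff]; omega
      rw [hdk, hdrop1]
      simp [emitT, Etok, stepP, stepE_last, List.getElem?_eq_getElem hk]
    | inr hdpos =>
      have hk1 : gs.length - (d+1) + 1 = gs.length - d := by omega
      have hk1lt : gs.length - d < gs.length := by omega
      have hdk2 : gs.drop (gs.length - d) = gs[gs.length - d] :: gs.drop (gs.length - d + 1) :=
        List.drop_eq_getElem_cons hk1lt
      have hIH := ihd hdpos (by omega)
      rw [hdk, hk1, hdk2]
      simp only [emitT]
      rw [hk1, ← hdk2, hIH]
      simp only [Etok]
      have hgetD2 : gs.getD (gs.length - d) 0 = gs[gs.length - d] := by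
        simp [List.getD_eq_getElem?_getD, List.getElem?_eq_getElem hk1lt]
      have hE : stepE gs (gs.length - (d+1)) =
          if gs[gs.length - d] ≠ 0 ∨ (gs.length - (d+1)) % 4 = 3
          then [pvExpanders ((gs.length - (d+1)) % 4)] else [] := by
        simp only [stepE, hk1, hgetD2]
        simp [hk1lt]
      have hne : ¬ (gs.length - (d+1) = gs.length - 1) := by omega
      have hP : stepP gs (gs.length - (d+1)) =
          if gs[gs.length - (d+1)] ≠ 0 then [PySem.Int.toStr gs[gs.length - (d+1)]] else [] := by
        simp [stepP, List.getD_eq_getElem?_getD, List.getElem?_eq_getElem hk, hne]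
      rw [hE, hP]

-- ===== VERDICT (by name: the statement is the Claim_ definition above) =====
theorem bangla_spec : Claim_equal_bangla := by
  intro number _ hpre
  unfold Spec_bangla bangla bangla_alt pvSplit
  set gs := splitGo (number.toNat + 1) number 0 with hgs
  have hne : gs ≠ [] := splitGo_ne_nil _ _ _
  have hlen : 0 < gs.length := List.length_pos_iff.mpr hne
  simp only [List.length_reverse]
  rw [banglaLoop_main gs hne]
  rw [wordsGo_eq_emitT (number.toNat + 1) number 0 hpre (by omega), ← hgs]
  have := emitT_eq_Etok gs gs.length hlen le_rfl
  simp only [Nat.sub_self, List.drop_zero] at this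
  rw [this]
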